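-- pv_equiv track=rewrite | github.com/YuraPopovych/Objects-Algorithms | Exam/rabbitHole.py | rabbit_hole
-- ===== SOURCE A (Python) =====
-- def rabbit_hole(data_set, target_string):
--     try:
--         if type(target_string) == list:
--             previous_key = target_string[0]
--             target_string = target_string[-1]
--             if previous_key == data_set[target_string]:
--                 return False
--
--         key_value = []
--         key_value.append( target_string )
--         key_value.append( data_set[target_string] )
--         return rabbit_hole(data_set, key_value)
--     except KeyError:
--         return target_string
-- ===== SOURCE B (Python) =====
-- def rabbit_hole(data_set, target_string):
--     # Walk the pointer chain over a shrinking copy of the dict: each visited key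
--     # is popped, so the walk always terminates and stops at the first key that is
--     # absent (either never present or already consumed by a cycle).
--     remaining = dict(data_set)
--     cur = target_string
--     while cur in remaining:
--         cur = remaining.pop(cur)
--     return cur
-- ===== Notes on version B (the rewrite author's own statement) =====
-- stated objective: simpler
-- what changed: Replaces the recursion with list-packed [prev,cur] state and a 2-cycle test by a while-loop over a shrinking copy of the dict that pops each visited key, so the walk terminates at the first missing key without any cycle test.
-- outside the precondition, e.g. on rabbit_hole({'a': 'b', 'b': 'a'}, 'a'): A returns False, B returns 'a'; on rabbit_hole({'a': 'b', 'b': 'c', 'c': 'a'}, 'a'): A raises RecursionError, B returns 'a'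
import Mathlib
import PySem

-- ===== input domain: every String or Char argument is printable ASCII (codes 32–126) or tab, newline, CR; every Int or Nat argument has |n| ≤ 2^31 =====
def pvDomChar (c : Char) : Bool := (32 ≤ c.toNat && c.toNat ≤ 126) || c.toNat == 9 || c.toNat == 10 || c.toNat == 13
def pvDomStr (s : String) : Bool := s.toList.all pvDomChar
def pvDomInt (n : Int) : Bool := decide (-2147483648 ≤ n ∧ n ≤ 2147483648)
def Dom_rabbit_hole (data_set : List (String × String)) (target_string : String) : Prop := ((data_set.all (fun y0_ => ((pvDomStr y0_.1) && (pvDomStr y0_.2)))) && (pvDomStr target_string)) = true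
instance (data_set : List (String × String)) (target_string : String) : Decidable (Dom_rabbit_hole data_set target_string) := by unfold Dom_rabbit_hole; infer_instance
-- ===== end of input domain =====

-- B replaces A's recursion with list-packed [prev,cur] state and its 2-cycle test by a
-- walk over a shrinking copy of the dict (each visited key is popped): simpler, total.
-- dict lookup (first match = association-list convention)
def dget? (d : List (String × String)) (k : String) : Option String :=
  (d.find? (fun p => p.1 == k)).map (·.2)

-- ===== PORT A =====
-- A's recursive call with key_value = [prev, cur]; the Python recursion has no
-- termination measure (RecursionError on long cycles), so the port carries fuel;
-- fuel-exhaustion and the Python 'return False' (a bool, not a str) are outside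
-- Pre_ and return "" here.
def rabbit_hole_go (data_set : List (String × String)) (prev cur : String) : Nat → String
  | 0 => ""
  | fuel + 1 =>
    match dget? data_set cur with
    | none => cur                                   -- except KeyError: return target_string
    | some nxt =>
      if prev == nxt then ""                        -- Python: return False (non-str, outside Pre_)
      else rabbit_hole_go data_set cur nxt fuel     -- return rabbit_hole(data_set, [cur, nxt])

def rabbit_hole (data_set : List (String × String)) (target_string : String) : String :=
  match dget? data_set target_string with
  | none => target_string                           -- except KeyError: return target_string
  | some v => rabbit_hole_go data_set target_string v (data_set.length + 1)

-- ===== PORT B =====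
-- termination measure for B's pop: a successful lookup makes the erased dict shorter
theorem erase_len_lt {d : List (String × String)} {t v : String}
    (h : dget? d t = some v) :
    (d.eraseP (fun p => p.1 == t)).length < d.length := by
  have hmem : ∃ p ∈ d, p.1 = t := by
    cases hf : d.find? (fun p => p.1 == t) with
    | none => simp [dget?, hf] at h
    | some p =>
      refine ⟨p, List.mem_of_find?_eq_some hf, ?_⟩
      have := List.find?_some hf
      simpa using this
  obtain ⟨p, hp, hpt⟩ := hmem
  have := List.length_eraseP_add_one (p := fun q : String × String => q.1 == t) hp (by simp [hpt])
  omega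

-- B: 'while cur in remaining: cur = remaining.pop(cur)'; the recursion is on the
-- shrinking dict itself, no fuel needed.
def rabbit_hole_alt (data_set : List (String × String)) (target_string : String) : String :=
  match h : dget? data_set target_string with
  | none => target_string
  | some v => rabbit_hole_alt (data_set.eraseP (fun p => p.1 == target_string)) v
termination_by data_set.length
decreasing_by exact erase_len_lt h

-- ===== PRECONDITION & SPEC =====
-- one step of the pointer chain (stays put on a missing key)
def chainStep (data_set : List (String × String)) (x : String) : String :=
  ((data_set.find? (fun p => p.1 == x)).map (·.2)).getD x

-- Pre_ excludes exactly the inputs whose pointer chain never leaves the dict (it cycles):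
-- there Python A returns the bool False (not a str) on a 2-cycle/self-loop and hits
-- RecursionError on longer cycles, so no string value is claimed.
def Pre_rabbit_hole (data_set : List (String × String)) (target_string : String) : Prop :=
  ∃ k ≤ data_set.length, (data_set.find? (fun p => p.1 = (chainStep data_set)^[k] target_string)) = none
instance (data_set : List (String × String)) (target_string : String) : Decidable (Pre_rabbit_hole data_set target_string) := by unfold Pre_rabbit_hole; infer_instance

def pvWitness_rabbit_hole : (List (String × String)) × String := ([("a", "b"), ("b", "c")], "a")

def Spec_rabbit_hole (data_set : List (String × String)) (target_string : String) (out : String) : Prop := out = rabbit_hole_alt data_set target_string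
instance (data_set : List (String × String)) (target_string : String) (out : String) : Decidable (Spec_rabbit_hole data_set target_string out) := by unfold Spec_rabbit_hole; infer_instance

-- ===== CLAIM (what is proved, stated in full; the proofs are below) =====
def Claim_equal_rabbit_hole : Prop := ∀ (data_set : List (String × String)) (target_string : String), Dom_rabbit_hole data_set target_string → Pre_rabbit_hole data_set target_string → Spec_rabbit_hole data_set target_string (rabbit_hole data_set target_string)

-- ===== LEMMAS AND PROOFS =====

theorem chainStep_eq_of_dget {d : List (String × String)} {x v : String}
    (h : dget? d x = some v) : chainStep d x = v := by
  cases hf : d.find? (fun p => p.1 == x) with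
  | none => simp [dget?, hf] at h
  | some p =>
    simp [dget?, hf] at h
    simp [chainStep, hf, h]

theorem chainStep_fixed {d : List (String × String)} {x : String}
    (h : dget? d x = none) : chainStep d x = x := by
  unfold chainStep
  cases hf : d.find? (fun p => p.1 == x) with
  | none => simp
  | some p => exfalso; simp [dget?, hf] at h

theorem find?_none_iff_dget {d : List (String × String)} {x : String} :
    (d.find? (fun p => p.1 = x)) = none ↔ dget? d x = none := by
  simp [dget?]

-- erasing a key other than the one looked up does not change the lookup
theorem dget?_erase {d : List (String × String)} {t x : String} (hne : x ≠ t) :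
    dget? (d.eraseP (fun p => p.1 == t)) x = dget? d x := by
  induction d with
  | nil => rfl
  | cons a l ih =>
    by_cases hat : a.1 = t
    · have he : (a :: l).eraseP (fun p => p.1 == t) = l := by
        simp [hat]
      have hax : (a.1 == x) = false := by
        simp only [beq_eq_false_iff_ne]; exact fun hh => hne (hat ▸ hh).symm
      rw [he]
      simp [dget?, hax]
    · have he : (a :: l).eraseP (fun p => p.1 == t) = a :: l.eraseP (fun p => p.1 == t) := by
        simp [hat]
      rw [he]
      by_cases hax : a.1 = x
      · simp [dget?, hax]
      · have hax' : (a.1 == x) = false := by simpa using hax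
        simp only [dget?, List.find?_cons, hax']
        exact ih

theorem iterate_mod {α : Type} (f : α → α) {x : α} {p : Nat}
    (hfix : f^[p] x = x) (m : Nat) : f^[m] x = f^[m % p] x := by
  conv_lhs => rw [← Nat.mod_add_div m p]
  rw [Function.iterate_add_apply, Function.iterate_mul, Function.iterate_fixed hfix]

-- if the chain exits at step k (first lookup failure), it never revisits its start
theorem chain_no_return {d : List (String × String)} {t : String} {k : Nat}
    (hk : dget? d ((chainStep d)^[k] t) = none)
    (hlt : ∀ j < k, dget? d ((chainStep d)^[j] t) ≠ none) :
    ∀ p, 0 < p → p ≤ k → (chainStep d)^[p] t ≠ t := by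
  intro p hp hpk hfix
  have hmod := iterate_mod (chainStep d) hfix k
  have hlt' : k % p < k := lt_of_lt_of_le (Nat.mod_lt _ hp) hpk
  exact hlt (k % p) hlt' (hmod ▸ hk)

theorem chainStep_erase {d : List (String × String)} {t x : String} (hne : x ≠ t) :
    chainStep (d.eraseP (fun p => p.1 == t)) x = chainStep d x := by
  unfold chainStep
  have := dget?_erase (d := d) hne
  simp only [dget?] at this
  rw [this]

-- iterates of the chain agree on d and on d-with-t-erased while the chain avoids t
theorem iterate_erase {d : List (String × String)} {t v : String} :
    ∀ (j : Nat), (∀ i < j, (chainStep d)^[i] v ≠ t) →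
      (chainStep (d.eraseP (fun p => p.1 == t)))^[j] v = (chainStep d)^[j] v := by
  intro j
  induction j with
  | zero => intro _; rfl
  | succ j ih =>
    intro havoid
    rw [Function.iterate_succ_apply', Function.iterate_succ_apply',
        ih (fun i hi => havoid i (by omega))]
    exact chainStep_erase (havoid j (by omega))

-- B follows the chain of the ORIGINAL dict to its first missing key
theorem alt_eq (k : Nat) : ∀ (d : List (String × String)) (t : String),
    dget? d ((chainStep d)^[k] t) = none →
    (∀ j < k, dget? d ((chainStep d)^[j] t) ≠ none) →
    rabbit_hole_alt d t = (chainStep d)^[k] t := by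
  induction k with
  | zero =>
    intro d t h0 _
    simp at h0
    rw [rabbit_hole_alt, h0]
    simp
  | succ k ih =>
    intro d t hk hlt
    have h0 : dget? d t ≠ none := by
      have := hlt 0 (Nat.succ_pos k); simpa using this
    obtain ⟨v, hv⟩ := Option.ne_none_iff_exists'.mp h0
    have hstep : chainStep d t = v := chainStep_eq_of_dget hv
    rw [rabbit_hole_alt, hv]
    simp only []
    -- positions 0..k of the v-chain never revisit t
    have havoid : ∀ i ≤ k, (chainStep d)^[i] v ≠ t := by
      intro i hik
      have : (chainStep d)^[i] v = (chainStep d)^[i + 1] t := by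
        rw [Function.iterate_succ_apply, hstep]
      rw [this]
      exact chain_no_return hk (fun j hj => hlt j hj) (i + 1) (by omega) (by omega)
    set d' := d.eraseP (fun p => p.1 == t) with hd'
    -- the exit data transfers to (d', v, k)
    have hiter : ∀ j ≤ k, (chainStep d')^[j] v = (chainStep d)^[j] v := by
      intro j hj
      exact iterate_erase j (fun i hi => havoid i (by omega))
    have hk' : dget? d' ((chainStep d')^[k] v) = none := by
      rw [hiter k le_rfl, dget?_erase (havoid k le_rfl)]
      rw [← hstep, ← Function.iterate_succ_apply]; exact hk
    have hlt' : ∀ j < k, dget? d' ((chainStep d')^[j] v) ≠ none := by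
      intro j hj
      rw [hiter j (by omega), dget?_erase (havoid j (by omega))]
      rw [← hstep, ← Function.iterate_succ_apply]
      exact hlt (j + 1) (by omega)
    show rabbit_hole_alt d' v = (chainStep d)^[k + 1] t
    rw [ih d' v hk' hlt', hiter k le_rfl, ← hstep, ← Function.iterate_succ_apply]

-- a point of period two whose two values are keys traps the chain forever
theorem period_two_trap {d : List (String × String)} {p : String}
    (h2 : chainStep d (chainStep d p) = p)
    (hp : dget? d p ≠ none) (hq : dget? d (chainStep d p) ≠ none) :
    ∀ m, dget? d ((chainStep d)^[m] p) ≠ none := by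
  intro m
  have key : (chainStep d)^[m] p = p ∨ (chainStep d)^[m] p = chainStep d p := by
    have hper : (chainStep d)^[2] p = p := by
      simpa [Function.iterate_succ_apply'] using h2
    obtain ⟨q, r, hr, rfl⟩ : ∃ q r, r < 2 ∧ m = r + 2 * q :=
      ⟨m / 2, m % 2, Nat.mod_lt _ (by norm_num), by omega⟩
    rw [Function.iterate_add_apply, Function.iterate_mul, Function.iterate_fixed hper]
    interval_cases r
    · left; rfl
    · right; simp
  rcases key with h | h <;> rw [h] <;> assumption

-- A's recursion follows the chain to the first missing key; under Pre_ (the chain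
-- does leave the dict) the 2-cycle branch can never fire
theorem a_go_eq (d : List (String × String)) :
    ∀ (k : Nat) (prev cur : String) (fuel : Nat),
      chainStep d prev = cur → dget? d prev ≠ none →
      dget? d ((chainStep d)^[k] cur) = none →
      (∀ j < k, dget? d ((chainStep d)^[j] cur) ≠ none) →
      k + 1 ≤ fuel →
      rabbit_hole_go d prev cur fuel = (chainStep d)^[k] cur := by
  intro k
  induction k with
  | zero =>
    intro prev cur fuel hpc hpk h0 _ hf
    obtain ⟨f, rfl⟩ := Nat.exists_eq_add_of_le hf
    simp at h0
    simp [rabbit_hole_go, Nat.add_comm, h0]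
  | succ k ih =>
    intro prev cur fuel hpc hpk hk hlt hf
    have h0 : dget? d cur ≠ none := by
      have := hlt 0 (Nat.succ_pos k); simpa using this
    obtain ⟨v, hv⟩ := Option.ne_none_iff_exists'.mp h0
    have hstep : chainStep d cur = v := chainStep_eq_of_dget hv
    -- the 2-cycle branch contradicts Pre_
    have hne : prev ≠ v := by
      intro hpe
      subst hpe
      have h2 : chainStep d (chainStep d prev) = prev := by rw [hpc, hstep]
      have htrap := period_two_trap h2 hpk (by rw [hpc]; exact h0)
      have : dget? d ((chainStep d)^[k + 2] prev) ≠ none := htrap (k + 2)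
      apply this
      have : (chainStep d)^[k + 2] prev = (chainStep d)^[k + 1] cur := by
        rw [Function.iterate_succ_apply, hpc]
      rw [this]; exact hk
    obtain ⟨f, rfl⟩ := Nat.exists_eq_add_of_le hf
    have hunf : rabbit_hole_go d prev cur (k + 1 + 1 + f) =
        rabbit_hole_go d cur v (k + 1 + f) := by
      have : k + 1 + 1 + f = (k + 1 + f) + 1 := by omega
      rw [this]
      simp [rabbit_hole_go, hv]
      intro h; exact absurd h hne
    rw [hunf]
    have hk' : dget? d ((chainStep d)^[k] v) = none := by
      rw [← hstep, ← Function.iterate_succ_apply]; exact hk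
    have hlt' : ∀ j < k, dget? d ((chainStep d)^[j] v) ≠ none := by
      intro j hj
      rw [← hstep, ← Function.iterate_succ_apply]
      exact hlt (j + 1) (by omega)
    have := ih cur v (k + 1 + f) hstep h0 hk' hlt' (by omega)
    rw [this, ← hstep, ← Function.iterate_succ_apply]

-- ===== VERDICT (by name: the statement is the Claim_ definition above) =====
theorem rabbit_hole_spec : Claim_equal_rabbit_hole := by
  intro d t _ hpre
  unfold Spec_rabbit_hole
  obtain ⟨k, hkle, hknone⟩ := hpre
  rw [find?_none_iff_dget] at hknone
  -- take the least such k
  have hex : ∃ k, dget? d ((chainStep d)^[k] t) = none := ⟨k, hknone⟩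
  classical
  let k₀ := Nat.find hex
  have hk₀ : dget? d ((chainStep d)^[k₀] t) = none := Nat.find_spec hex
  have hk₀min : ∀ j < k₀, dget? d ((chainStep d)^[j] t) ≠ none :=
    fun j hj => Nat.find_min hex hj
  have hk₀le : k₀ ≤ d.length := le_trans (Nat.find_min' hex hknone) hkle
  have halt : rabbit_hole_alt d t = (chainStep d)^[k₀] t :=
    alt_eq k₀ d t hk₀ hk₀min
  rw [halt]
  unfold rabbit_hole
  cases hdt : dget? d t with
  | none =>
    rw [Function.iterate_fixed (chainStep_fixed hdt)]
  | some v =>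
    have hk₀pos : 0 < k₀ := by
      rcases Nat.eq_zero_or_pos k₀ with h | h
      · exfalso; rw [h] at hk₀; simp [hdt] at hk₀
      · exact h
    obtain ⟨k₁, hke⟩ : ∃ k₁, k₀ = k₁ + 1 := ⟨k₀ - 1, by omega⟩
    rw [hke] at hk₀ halt
    have hk₀min' : ∀ j < k₁ + 1, dget? d ((chainStep d)^[j] t) ≠ none := by
      rw [← hke]; exact hk₀min
    have hstep : chainStep d t = v := chainStep_eq_of_dget hdt
    have hk' : dget? d ((chainStep d)^[k₁] v) = none := by
      rw [← hstep, ← Function.iterate_succ_apply]; exact hk₀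
    have hlt' : ∀ j < k₁, dget? d ((chainStep d)^[j] v) ≠ none := by
      intro j hj
      rw [← hstep, ← Function.iterate_succ_apply]
      exact hk₀min' (j + 1) (by omega)
    have hgo := a_go_eq d k₁ t v (d.length + 1) hstep (by simp [hdt]) hk' hlt' (by omega)
    show rabbit_hole_go d t v (d.length + 1) = (chainStep d)^[k₀] t
    rw [hke, hgo, ← hstep, ← Function.iterate_succ_apply]
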